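-- pv_equiv track=rewrite | github.com/Zayn-Rekhi/GetThereGreen | network/clean_data.py | scale_data
-- ===== SOURCE A (Python) =====
-- def scale_data(train_data, scale):
--     if not all(x==train_data[0] for x in train_data):
--         data = []
--         for point in train_data:
--             index = 0
--             for numb1, numb2, count in zip(scale[:-1], scale[1:], range(0, len(scale) - 1)):
--                 if numb1 <= point <= numb2:
--                     index = count
--                     break
--             data.append(index)
--         return data
--     else:
--         return [0]
-- ===== SOURCE B (Python) =====
-- def scale_data(train_data, scale):
--     if all(x == train_data[0] for x in train_data):
--         return [0]
--     # Sweep the intervals once, assigning each DISTINCT value its first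
--     # matching interval index; then answer every point by dictionary lookup.
--     idx_of = {}
--     pending = list(dict.fromkeys(train_data))
--     i = 0
--     for lo, hi in zip(scale, scale[1:]):
--         remaining = []
--         for v in pending:
--             if lo <= v <= hi:
--                 idx_of[v] = i
--             else:
--                 remaining.append(v)
--         pending = remaining
--         i += 1
--     return [idx_of.get(p, 0) for p in train_data]
-- ===== Notes on version B (the rewrite author's own statement) =====
-- stated objective: alternative
-- what changed: Instead of scanning all intervals for every point, B sweeps the intervals once, bucketing the distinct values of train_data into a dictionary, and then answers each point by a single lookup.
import Mathlib
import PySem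

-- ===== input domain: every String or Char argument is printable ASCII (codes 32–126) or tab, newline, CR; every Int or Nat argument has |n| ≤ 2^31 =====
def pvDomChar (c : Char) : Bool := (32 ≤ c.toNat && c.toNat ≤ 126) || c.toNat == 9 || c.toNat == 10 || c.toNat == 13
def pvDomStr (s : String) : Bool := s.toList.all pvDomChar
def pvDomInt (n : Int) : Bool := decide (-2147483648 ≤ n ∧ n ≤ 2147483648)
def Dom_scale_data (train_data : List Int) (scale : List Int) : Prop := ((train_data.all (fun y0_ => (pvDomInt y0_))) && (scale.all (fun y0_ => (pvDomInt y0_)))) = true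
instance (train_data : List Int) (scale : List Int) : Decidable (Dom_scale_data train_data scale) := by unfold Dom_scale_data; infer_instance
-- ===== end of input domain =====

-- B replaces A's per-point scan over all intervals by one sweep over the intervals
-- that buckets the distinct values into a dictionary (alternative algorithm).

-- ===== PORT A =====
-- A's inner loop with break: first matching interval's count, else the initial 0.
def scaleFirstIdx (point : Int) : List ((Int × Int) × Int) → Int
  | [] => 0
  | ((numb1, numb2), count) :: rest =>
      if numb1 ≤ point ∧ point ≤ numb2 then count else scaleFirstIdx point rest

def scale_data (train_data : List Int) (scale : List Int) : List Int :=
  if !(train_data.all (fun x => x == train_data.headD 0)) then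
    train_data.map (fun point => scaleFirstIdx point
      (((PySem.List.slice scale none (some (-1))).zip
          (PySem.List.slice scale (some 1) none)).zip
        (PySem.List.pyRange 0 ((scale.length : Int) - 1) 1)))
  else [0]

-- ===== PORT B =====
-- inner loop of Source B: partition `pending` into matched (inserted into the dict) and remaining
def sweepStep (lo hi i : Int) (acc : PySem.Dict Int Int × List Int) (v : Int) :
    PySem.Dict Int Int × List Int :=
  if lo ≤ v ∧ v ≤ hi then (acc.1.insert v i, acc.2) else (acc.1, acc.2 ++ [v])

-- outer loop of Source B over the interval pairs, carrying the running index i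
def sweep : List (Int × Int) → Int → PySem.Dict Int Int → List Int → PySem.Dict Int Int
  | [], _, d, _ => d
  | (lo, hi) :: rest, i, d, pending =>
      let s := pending.foldl (sweepStep lo hi i) (d, [])
      sweep rest (i + 1) s.1 s.2

def scale_data_alt (train_data : List Int) (scale : List Int) : List Int :=
  if train_data.all (fun x => x == train_data.headD 0) then [0]
  else
    train_data.map (fun p =>
      (sweep (scale.zip (PySem.List.slice scale (some 1) none)) 0
        PySem.Dict.empty (PySem.List.dedup train_data)).getD p 0)

-- ===== PRECONDITION & SPEC =====
def Spec_scale_data (train_data : List Int) (scale : List Int) (out : List Int) : Prop := out = scale_data_alt train_data scale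
instance (train_data : List Int) (scale : List Int) (out : List Int) : Decidable (Spec_scale_data train_data scale out) := by unfold Spec_scale_data; infer_instance

-- ===== CLAIM (what is proved, stated in full; the proofs are below) =====
def Claim_equal_scale_data : Prop := ∀ (train_data : List Int) (scale : List Int), Dom_scale_data train_data scale → Spec_scale_data train_data scale (scale_data train_data scale)

-- ===== LEMMAS AND PROOFS =====

-- reference function: first interval (counting from i) containing p, else 0
def firstIdxFrom (p : Int) (i : Int) : List (Int × Int) → Int
  | [] => 0
  | (lo, hi) :: rest => if lo ≤ p ∧ p ≤ hi then i else firstIdxFrom p (i + 1) rest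

-- zip truncation: pairing dropLast with tail equals pairing the list itself with tail
theorem zip_dropLast_tail (xs : List Int) : xs.dropLast.zip xs.tail = xs.zip xs.tail := by
  induction xs with
  | nil => rfl
  | cons a t ih =>
    cases t with
    | nil => rfl
    | cons b u =>
      have h := ih
      simp only [List.tail_cons] at h
      simp only [List.dropLast, List.tail_cons, List.zip_cons_cons]
      rw [h]

-- A's scan over the zipped triples is firstIdxFrom
theorem scaleFirstIdx_zip (p : Int) (pairs : List (Int × Int)) (i : Int) :
    scaleFirstIdx p (pairs.zip (PySem.List.pyRange i (i + pairs.length) 1)) =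
      firstIdxFrom p i pairs := by
  induction pairs generalizing i with
  | nil => simp [scaleFirstIdx, firstIdxFrom, PySem.List.pyRange_one_eq_nil]
  | cons q rest ih =>
    obtain ⟨lo, hi⟩ := q
    have hcons : PySem.List.pyRange i (i + (((lo, hi) :: rest).length : Int)) 1
        = i :: PySem.List.pyRange (i + 1) (i + (((lo, hi) :: rest).length : Int)) 1 :=
      PySem.List.pyRange_one_cons (by push_cast [List.length_cons]; omega)
    have harg : i + (((lo, hi) :: rest).length : Int) = (i + 1) + (rest.length : Int) := by
      push_cast [List.length_cons]; ring
    rw [hcons, harg]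
    simp only [List.zip_cons_cons, scaleFirstIdx, firstIdxFrom]
    split_ifs with h
    · rfl
    · exact ih (i + 1)

-- the inner fold: lookup in the dict component
theorem fold_fst_get? (lo hi i p : Int) (pending : List Int)
    (d : PySem.Dict Int Int) (out : List Int) :
    ((pending.foldl (sweepStep lo hi i) (d, out)).1).get? p =
      if p ∈ pending ∧ lo ≤ p ∧ p ≤ hi then some i else d.get? p := by
  induction pending generalizing d out with
  | nil => simp
  | cons v rest ih =>
    simp only [List.foldl_cons, sweepStep]
    by_cases hv : lo ≤ v ∧ v ≤ hi
    · simp only [if_pos hv]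
      rw [ih, PySem.Dict.get?_insert]
      by_cases hvp : p = v
      · subst hvp
        simp [hv]
      · simp only [if_neg hvp, List.mem_cons]
        by_cases hc : p ∈ rest ∧ lo ≤ p ∧ p ≤ hi
        · simp [hc]
        · simp only [if_neg hc]
          rw [if_neg]
          intro h2
          exact hc ⟨h2.1.resolve_left hvp, h2.2⟩
    · simp only [if_neg hv]
      rw [ih]
      by_cases hvp : p = v
      · subst hvp
        simp [hv]
      · simp only [List.mem_cons]
        by_cases hc : p ∈ rest ∧ lo ≤ p ∧ p ≤ hi
        · simp [hc]
        · simp only [if_neg hc]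
          rw [if_neg]
          intro h2
          exact hc ⟨h2.1.resolve_left hvp, h2.2⟩

-- the inner fold: membership in the remaining component
theorem fold_snd_mem (lo hi i p : Int) (pending : List Int)
    (d : PySem.Dict Int Int) (out : List Int) :
    p ∈ (pending.foldl (sweepStep lo hi i) (d, out)).2 ↔
      p ∈ out ∨ (p ∈ pending ∧ ¬(lo ≤ p ∧ p ≤ hi)) := by
  induction pending generalizing d out with
  | nil => simp
  | cons v rest ih =>
    simp only [List.foldl_cons, sweepStep]
    by_cases hv : lo ≤ v ∧ v ≤ hi
    · simp only [if_pos hv]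
      rw [ih]
      simp only [List.mem_cons]
      constructor
      · rintro (h | h)
        · exact Or.inl h
        · exact Or.inr ⟨Or.inr h.1, h.2⟩
      · rintro (h | ⟨(rfl | hm), hnm⟩)
        · exact Or.inl h
        · exact absurd hv hnm
        · exact Or.inr ⟨hm, hnm⟩
    · simp only [if_neg hv]
      rw [ih]
      simp only [List.mem_append, List.mem_cons, List.not_mem_nil, or_false]
      constructor
      · rintro ((h | rfl) | h)
        · exact Or.inl h
        · exact Or.inr ⟨Or.inl rfl, hv⟩
        · exact Or.inr ⟨Or.inr h.1, h.2⟩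
      · rintro (h | ⟨(rfl | hm), hnm⟩)
        · exact Or.inl (Or.inl h)
        · exact Or.inl (Or.inr rfl)
        · exact Or.inr ⟨hm, hnm⟩

-- keys not pending are untouched by the whole sweep
theorem sweep_get?_of_not_pending (pairs : List (Int × Int)) (i p : Int)
    (d : PySem.Dict Int Int) (pending : List Int) (hp : p ∉ pending) :
    (sweep pairs i d pending).get? p = d.get? p := by
  induction pairs generalizing i d pending with
  | nil => rfl
  | cons q rest ih =>
    obtain ⟨lo, hi⟩ := q
    simp only [sweep]
    rw [ih _ _ _ (by rw [fold_snd_mem]; simp [hp])]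
    rw [fold_fst_get?]
    simp [hp]

-- main invariant: a pending, unassigned value ends at its first matching interval
theorem sweep_getD_of_pending (pairs : List (Int × Int)) (i p : Int)
    (d : PySem.Dict Int Int) (pending : List Int)
    (hp : p ∈ pending) (hd : d.get? p = none) :
    (sweep pairs i d pending).getD p 0 = firstIdxFrom p i pairs := by
  induction pairs generalizing i d pending with
  | nil =>
    simp only [sweep, firstIdxFrom]
    rw [PySem.Dict.getD_eq_get?_getD, hd]
    rfl
  | cons q rest ih =>
    obtain ⟨lo, hi⟩ := q
    simp only [sweep, firstIdxFrom]
    by_cases hm : lo ≤ p ∧ p ≤ hi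
    · rw [if_pos hm]
      rw [PySem.Dict.getD_eq_get?_getD,
        sweep_get?_of_not_pending _ _ _ _ _ (by rw [fold_snd_mem]; simp [hm]),
        fold_fst_get?]
      simp [hp, hm]
    · rw [if_neg hm]
      exact ih _ _ _ (by rw [fold_snd_mem]; simp [hp, hm])
        (by rw [fold_fst_get?]; simp [hm, hd])

-- ===== VERDICT (by name: the statement is the Claim_ definition above) =====
theorem scale_data_spec : Claim_equal_scale_data := by
  intro train_data scale _
  unfold Spec_scale_data scale_data scale_data_alt
  cases hall : train_data.all (fun x => x == train_data.headD 0) with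
  | true => simp
  | false =>
    rw [if_pos (by simp), if_neg (by simp)]
    simp only [PySem.List.slice_to_neg_one, PySem.List.slice_from_one]
    apply List.map_congr_left
    intro p hp
    rw [zip_dropLast_tail]
    have hlen : PySem.List.pyRange 0 ((scale.length : Int) - 1) 1 =
        PySem.List.pyRange 0 (0 + ((scale.zip scale.tail).length : Int)) 1 := by
      cases scale with
      | nil => simp
      | cons a t =>
        congr 1
        simp [List.length_zip]
    rw [hlen, scaleFirstIdx_zip]
    rw [sweep_getD_of_pending _ _ _ _ _
      (by rw [PySem.List.mem_dedup]; exact hp) (PySem.Dict.get?_empty p)]
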